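-- pv_equiv track=rewrite | github.com/SzymonRymszewicz/Project_Nova | Modules/Empathy/empathy_prompt_pipeline.py | _extract_latest_messages
-- ===== SOURCE A (Python) =====
-- def _extract_latest_messages(messages):
--     latest_user = ""
--     latest_assistant = ""
--     for row in reversed(messages or []):
--         role = str(row.get("role") or "").strip().lower()
--         content = str(row.get("content") or "").strip()
--         if not content:
--             continue
--         if not latest_user and role == "user":
--             latest_user = content
--         elif not latest_assistant and role == "assistant":
--             latest_assistant = content
--         if latest_user and latest_assistant:
--             break
--     return latest_user, latest_assistant
-- ===== SOURCE B (Python) =====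
-- def _extract_latest_messages(messages):
--     rows = [(str(row.get("role") or "").strip().lower(),
--              str(row.get("content") or "").strip())
--             for row in (messages or [])]
--     users = [c for r, c in rows if c and r == "user"]
--     assistants = [c for r, c in rows if c and r == "assistant"]
--     return (users[-1] if users else "", assistants[-1] if assistants else "")
-- ===== Notes on version B (the rewrite author's own statement) =====
-- stated objective: simpler
-- what changed: Replaced the reverse scan with two flag variables and an early break by a single forward pass that builds the normalized (role, content) pairs once, filters the non-empty contents per role with comprehensions, and returns the last element of each list (or "").
import Mathlib
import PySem

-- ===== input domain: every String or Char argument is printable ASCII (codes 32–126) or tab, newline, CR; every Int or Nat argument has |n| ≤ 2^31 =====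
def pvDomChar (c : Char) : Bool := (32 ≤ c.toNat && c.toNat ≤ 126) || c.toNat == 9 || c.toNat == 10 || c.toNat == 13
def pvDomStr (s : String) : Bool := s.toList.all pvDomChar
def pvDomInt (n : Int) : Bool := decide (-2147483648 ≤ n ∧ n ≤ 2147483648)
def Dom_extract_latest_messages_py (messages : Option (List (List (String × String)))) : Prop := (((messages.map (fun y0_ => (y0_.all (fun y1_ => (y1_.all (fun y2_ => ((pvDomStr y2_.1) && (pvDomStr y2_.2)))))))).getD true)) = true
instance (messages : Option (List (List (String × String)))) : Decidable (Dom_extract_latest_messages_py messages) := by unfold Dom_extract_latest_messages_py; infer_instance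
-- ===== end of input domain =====

-- B replaces A's reverse scan with flags and early break by a forward pass building the
-- filtered per-role content lists and taking their last elements (objective: simpler).

-- ===== PORT A =====
-- reverse loop with early break, transcribed as structural recursion over the reversed list
def pvLoopA : List (List (String × String)) → String → String → String × String
  | [], latest_user, latest_assistant => (latest_user, latest_assistant)
  | row :: rest, latest_user, latest_assistant =>
    let role := PySem.Str.lower (PySem.Str.strip ((row.lookup "role").getD ""))
    let content := PySem.Str.strip ((row.lookup "content").getD "")
    if content = "" then pvLoopA rest latest_user latest_assistant
    else
      let lu := if latest_user = "" ∧ role = "user" then content else latest_user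
      let la := if ¬ (latest_user = "" ∧ role = "user") ∧ latest_assistant = "" ∧ role = "assistant"
                then content else latest_assistant
      if lu ≠ "" ∧ la ≠ "" then (lu, la) else pvLoopA rest lu la

def extract_latest_messages_py (messages : Option (List (List (String × String)))) : String × String :=
  pvLoopA (messages.getD []).reverse "" ""

-- ===== PORT B =====
def pvNormB (row : List (String × String)) : String × String :=
  (PySem.Str.lower (PySem.Str.strip ((row.lookup "role").getD "")),
   PySem.Str.strip ((row.lookup "content").getD ""))

def extract_latest_messages_py_alt (messages : Option (List (List (String × String)))) : String × String :=
  let rows := (messages.getD []).map pvNormB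
  let users := (rows.filter (fun rc => rc.2 ≠ "" ∧ rc.1 = "user")).map (·.2)
  let assistants := (rows.filter (fun rc => rc.2 ≠ "" ∧ rc.1 = "assistant")).map (·.2)
  ((users.getLast?).getD "", (assistants.getLast?).getD "")

-- ===== PRECONDITION & SPEC =====
def Spec_extract_latest_messages_py (messages : Option (List (List (String × String)))) (out : String × String) : Prop := out = extract_latest_messages_py_alt messages
instance (messages : Option (List (List (String × String)))) (out : String × String) : Decidable (Spec_extract_latest_messages_py messages out) := by unfold Spec_extract_latest_messages_py; infer_instance

-- ===== CLAIM (what is proved, stated in full; the proofs are below) =====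
def Claim_equal_extract_latest_messages_py : Prop := ∀ (messages : Option (List (List (String × String)))), Dom_extract_latest_messages_py messages → Spec_extract_latest_messages_py messages (extract_latest_messages_py messages)

-- ===== LEMMAS AND PROOFS =====

-- first non-empty content of the given role in rs, "" if none
def pvFirst (who : String) (rs : List (List (String × String))) : String :=
  ((((rs.map pvNormB).filter (fun rc => rc.2 ≠ "" ∧ rc.1 = who)).map (·.2)).head?).getD ""

lemma pvFirst_cons (who : String) (row : List (String × String)) (rs : List (List (String × String))) :
    pvFirst who (row :: rs) =
      if (pvNormB row).2 ≠ "" ∧ (pvNormB row).1 = who then (pvNormB row).2 else pvFirst who rs := by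
  simp only [pvFirst, List.map_cons, List.filter_cons]
  by_cases h : (pvNormB row).2 ≠ "" ∧ (pvNormB row).1 = who
  · simp [h]
  · simp [h]

lemma pvLoopA_eq (rs : List (List (String × String))) (lu la : String) :
    pvLoopA rs lu la = ((if lu = "" then pvFirst "user" rs else lu),
                        (if la = "" then pvFirst "assistant" rs else la)) := by
  induction rs generalizing lu la with
  | nil => simp [pvLoopA, pvFirst]
  | cons row rest ih =>
    simp only [pvLoopA]
    rw [pvFirst_cons, pvFirst_cons]
    have hrole : PySem.Str.lower (PySem.Str.strip ((row.lookup "role").getD "")) = (pvNormB row).1 := rfl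
    have hcont : PySem.Str.strip ((row.lookup "content").getD "") = (pvNormB row).2 := rfl
    rw [hrole, hcont]
    generalize (pvNormB row).1 = r
    generalize (pvNormB row).2 = c
    by_cases hce : c = ""
    · simp [hce, ih]
    · have hua : ¬(("user" : String) = "assistant") := by decide
      rcases eq_or_ne r "user" with hru | hru <;> rcases eq_or_ne r "assistant" with hra | hra
      · exact absurd (hru ▸ hra) hua
      all_goals subst_vars
      all_goals rcases eq_or_ne lu "" with hlu | hlu <;> rcases eq_or_ne la "" with hla | hla <;>
        simp [*]

theorem pvMain (messages : Option (List (List (String × String)))) :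
    extract_latest_messages_py messages = extract_latest_messages_py_alt messages := by
  unfold extract_latest_messages_py extract_latest_messages_py_alt
  rw [pvLoopA_eq]
  have h : ∀ who, pvFirst who (messages.getD []).reverse =
      (((((messages.getD []).map pvNormB).filter (fun rc => rc.2 ≠ "" ∧ rc.1 = who)).map (·.2)).getLast?).getD "" := by
    intro who
    simp [pvFirst, ← List.map_reverse]
  rw [h, h]
  simp

-- ===== VERDICT (by name: the statement is the Claim_ definition above) =====
theorem extract_latest_messages_py_spec : Claim_equal_extract_latest_messages_py := by
  intro messages _
  exact pvMain messages
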